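-- pv_equiv track=rewrite | github.com/InflectionAI/torchtune | medusa_eval.py | find_index_in_list
-- ===== SOURCE A (Python) =====
-- def find_index_in_list(target_index, predlist):
--     index_sum = 0
--     for i, elem in enumerate(predlist):
--         index_sum += len(elem)
--         if index_sum>target_index:
--             return i-1
--         if index_sum == target_index:
--             return i
--     return None
-- ===== SOURCE B (Python) =====
-- from bisect import bisect_left
-- from itertools import accumulate
--
-- def find_index_in_list(target_index, predlist):
--     prefix = list(accumulate(len(e) for e in predlist))
--     idx = bisect_left(prefix, target_index)
--     if idx == len(prefix):
--         return None
--     if prefix[idx] == target_index: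
--         return idx
--     return idx - 1
-- ===== Notes on version B (the rewrite author's own statement) =====
-- stated objective: alternative
-- what changed: Replaces the incremental early-exit scan with building a prefix-sum table of cumulative lengths and binary-searching it (bisect_left) for the first cumulative sum >= target.
import Mathlib
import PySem

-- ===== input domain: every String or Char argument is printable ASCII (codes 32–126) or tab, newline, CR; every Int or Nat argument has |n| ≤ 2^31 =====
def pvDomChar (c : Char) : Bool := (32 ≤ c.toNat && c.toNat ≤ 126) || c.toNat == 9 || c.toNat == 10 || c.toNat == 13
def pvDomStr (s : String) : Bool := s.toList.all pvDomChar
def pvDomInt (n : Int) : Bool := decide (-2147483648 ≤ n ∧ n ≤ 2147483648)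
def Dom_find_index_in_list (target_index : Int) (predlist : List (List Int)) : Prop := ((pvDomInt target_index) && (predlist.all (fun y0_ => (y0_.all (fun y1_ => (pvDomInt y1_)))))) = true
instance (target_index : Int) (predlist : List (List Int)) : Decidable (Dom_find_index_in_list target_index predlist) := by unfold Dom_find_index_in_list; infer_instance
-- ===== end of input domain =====

-- B replaces A's incremental early-exit scan by a prefix-sum table plus bisect_left binary search (objective: alternative decomposition, same result).

-- ===== PORT A =====
-- A's enumerate loop with the running sum, early returns kept in order.
def fiGoA (target : Int) (i : Int) (acc : Int) : List (List Int) → Option Int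
  | [] => none
  | e :: rest =>
    let s := acc + (e.length : Int)
    if s > target then some (i - 1)
    else if s = target then some i
    else fiGoA target (i + 1) s rest

def find_index_in_list (target_index : Int) (predlist : List (List Int)) : Option Int :=
  fiGoA target_index 0 0 predlist

-- ===== PORT B =====
-- itertools.accumulate of the element lengths (running total `acc`).
def accumLens (acc : Int) : List (List Int) → List Int
  | [] => []
  | e :: r => (acc + (e.length : Int)) :: accumLens (acc + (e.length : Int)) r

-- bisect.bisect_left: binary search on [lo, hi); fuel bounds the iteration count.
def blGo (xs : List Int) (x : Int) : Nat → Nat → Nat → Nat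
  | 0, lo, _ => lo
  | fuel + 1, lo, hi =>
    if lo < hi then
      let mid := (lo + hi) / 2
      if xs.getD mid 0 < x then blGo xs x fuel (mid + 1) hi
      else blGo xs x fuel lo mid
    else lo

def bisectLeft (xs : List Int) (x : Int) : Nat := blGo xs x xs.length 0 xs.length

def find_index_in_list_alt (target_index : Int) (predlist : List (List Int)) : Option Int :=
  let pref := accumLens 0 predlist
  let idx := bisectLeft pref target_index
  if idx = pref.length then none
  else if pref.getD idx 0 = target_index then some (idx : Int)
  else some ((idx : Int) - 1)

-- ===== PRECONDITION & SPEC =====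
def Spec_find_index_in_list (target_index : Int) (predlist : List (List Int)) (out : Option Int) : Prop := out = find_index_in_list_alt target_index predlist
instance (target_index : Int) (predlist : List (List Int)) (out : Option Int) : Decidable (Spec_find_index_in_list target_index predlist out) := by unfold Spec_find_index_in_list; infer_instance

-- ===== CLAIM (what is proved, stated in full; the proofs are below) =====
def Claim_equal_find_index_in_list : Prop := ∀ (target_index : Int) (predlist : List (List Int)), Dom_find_index_in_list target_index predlist → Spec_find_index_in_list target_index predlist (find_index_in_list target_index predlist)

-- ===== LEMMAS AND PROOFS =====

-- index monotonicity of a list (via getD)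
def MonoL (xs : List Int) : Prop := ∀ i j : Nat, i ≤ j → j < xs.length → xs.getD i 0 ≤ xs.getD j 0

theorem accumLens_lb (acc : Int) (pl : List (List Int)) : ∀ y ∈ accumLens acc pl, acc ≤ y := by
  induction pl generalizing acc with
  | nil => simp [accumLens]
  | cons e r ih =>
    intro y hy
    simp only [accumLens, List.mem_cons] at hy
    rcases hy with h | h
    · omega
    · have := ih (acc + (e.length : Int)) y h; omega

theorem accumLens_mono (acc : Int) (pl : List (List Int)) : MonoL (accumLens acc pl) := by
  induction pl generalizing acc with
  | nil => intro i j _ hj; simp [accumLens] at hj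
  | cons e r ih =>
    intro i j hij hj
    simp only [accumLens, List.length_cons] at hj ⊢
    match i, j with
    | 0, 0 => simp
    | 0, j + 1 =>
      simp only [List.getD_cons_zero, List.getD_cons_succ]
      have hjl : j < (accumLens (acc + (e.length : Int)) r).length := by omega
      have hmem : (accumLens (acc + (e.length : Int)) r).getD j 0 ∈ accumLens (acc + (e.length : Int)) r := by
        rw [List.getD_eq_getElem _ _ hjl]; exact List.getElem_mem hjl
      exact accumLens_lb _ _ _ hmem
    | i + 1, j + 1 =>
      simp only [List.getD_cons_succ]
      exact ih (acc + (e.length : Int)) i j (by omega) (by omega)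

-- the first index whose prefix sum is ≥ target
def fge (xs : List Int) (x : Int) : Nat := xs.findIdx (fun v => decide (x ≤ v))

theorem fge_le_length (xs : List Int) (x : Int) : fge xs x ≤ xs.length :=
  List.findIdx_le_length

theorem fge_le_of (xs : List Int) (x : Int) (m : Nat) (hm : m < xs.length)
    (h : x ≤ xs.getD m 0) : fge xs x ≤ m := by
  unfold fge
  by_contra hc
  have hc' : m < List.findIdx (fun v => decide (x ≤ v)) xs := by omega
  have hnp := List.not_of_lt_findIdx (p := fun v => decide (x ≤ v)) (xs := xs) (i := m) hc'
  rw [List.getD_eq_getElem _ _ hm] at h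
  simp at hnp
  omega

theorem lt_fge_of (xs : List Int) (x : Int) (m : Nat) (hm : m < xs.length)
    (hmono : MonoL xs) (h : xs.getD m 0 < x) : m < fge xs x := by
  by_contra hc
  have hc' : fge xs x ≤ m := by omega
  have hk : fge xs x < xs.length := lt_of_le_of_lt hc' hm
  have hp := List.findIdx_getElem (p := fun v => decide (x ≤ v)) (xs := xs) (w := hk)
  simp only [decide_eq_true_eq] at hp
  have hmn := hmono (fge xs x) m hc' hm
  rw [List.getD_eq_getElem _ _ hk] at hmn
  have : x ≤ xs.getD m 0 := le_trans hp hmn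
  omega

theorem blGo_eq_fge (xs : List Int) (x : Int) (hmono : MonoL xs) :
    ∀ fuel lo hi, lo ≤ fge xs x → fge xs x ≤ hi → hi ≤ xs.length → hi - lo ≤ fuel →
      blGo xs x fuel lo hi = fge xs x := by
  intro fuel
  induction fuel with
  | zero => intro lo hi h1 h2 _ h4; simp only [blGo]; omega
  | succ f ih =>
    intro lo hi h1 h2 h3 h4
    simp only [blGo]
    split_ifs with hlh hmid
    · -- xs[mid] < x : answer is right of mid
      have hmlt : (lo + hi) / 2 < xs.length := by omega
      have := lt_fge_of xs x ((lo + hi) / 2) hmlt hmono hmid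
      exact ih ((lo + hi) / 2 + 1) hi (by omega) h2 h3 (by omega)
    · -- x ≤ xs[mid] : answer is ≤ mid
      have hmlt : (lo + hi) / 2 < xs.length := by omega
      have := fge_le_of xs x ((lo + hi) / 2) hmlt (by omega)
      exact ih lo ((lo + hi) / 2) h1 this (by omega) (by omega)
    · omega

-- characterization of A's loop by the first index with prefix sum ≥ target
theorem fiGoA_char (target : Int) (pl : List (List Int)) : ∀ (i acc : Int),
    fiGoA target i acc pl =
      (let P := accumLens acc pl
       let k := fge P target
       if k < P.length then
         (if P.getD k 0 = target then some (i + (k : Int)) else some (i + (k : Int) - 1))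
       else none) := by
  induction pl with
  | nil => intro i acc; simp [fiGoA, accumLens, fge]
  | cons e r ih =>
    intro i acc
    simp only [fiGoA, accumLens]
    set s := acc + (e.length : Int) with hs
    by_cases h1 : s > target
    · have hd : (decide (target ≤ s)) = true := by simp; omega
      have hk : fge (s :: accumLens s r) target = 0 := by
        simp [fge, List.findIdx_cons, hd]
      simp only [hk, if_pos h1]
      have hne : ¬((s :: accumLens s r).getD 0 0 = target) := by
        simp; omega
      simp only [List.length_cons, Nat.zero_lt_succ, if_pos, if_neg hne, Nat.cast_zero,
        add_zero]
    · by_cases h2 : s = target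
      · have hd : (decide (target ≤ s)) = true := by simp; omega
        have hk : fge (s :: accumLens s r) target = 0 := by
          simp [fge, List.findIdx_cons, hd]
        simp only [hk, if_neg h1, if_pos h2]
        have heq : ((s :: accumLens s r).getD 0 0 = target) := by simp [h2]
        simp only [List.length_cons, Nat.zero_lt_succ, if_pos, if_pos heq, Nat.cast_zero,
          add_zero]
      · have hk : fge (s :: accumLens s r) target = fge (accumLens s r) target + 1 := by
          simp only [fge, List.findIdx_cons]
          have : (decide (target ≤ s)) = false := by simp; omega
          simp [this]
        simp only [if_neg h1, if_neg h2, ih (i + 1) s]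
        simp only [hk, List.length_cons, List.getD_cons_succ]
        by_cases hlt : fge (accumLens s r) target < (accumLens s r).length
        · have : fge (accumLens s r) target + 1 < (accumLens s r).length + 1 := by omega
          simp only [if_pos hlt, if_pos this]
          have hcast : i + 1 + (fge (accumLens s r) target : Int) = i + ((fge (accumLens s r) target + 1 : Nat) : Int) := by push_cast; ring
          split_ifs <;> simp only [Option.some.injEq] <;> omega
        · have : ¬(fge (accumLens s r) target + 1 < (accumLens s r).length + 1) := by omega
          simp only [if_neg hlt, if_neg this]

-- ===== VERDICT (by name: the statement is the Claim_ definition above) =====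
theorem find_index_in_list_spec : Claim_equal_find_index_in_list := by
  intro target pl _
  unfold Spec_find_index_in_list find_index_in_list find_index_in_list_alt
  rw [fiGoA_char]
  simp only
  set P := accumLens 0 pl with hP
  have hmono : MonoL P := accumLens_mono 0 pl
  have hidx : bisectLeft P target = fge P target := by
    unfold bisectLeft
    exact blGo_eq_fge P target hmono P.length 0 P.length (Nat.zero_le _)
      (fge_le_length P target) le_rfl (by omega)
  rw [hidx]
  have hle := fge_le_length P target
  by_cases hlt : fge P target < P.length
  · have hne : ¬(fge P target = P.length) := by omega
    simp only [if_pos hlt, if_neg hne]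
    split_ifs <;> simp only [Option.some.injEq] <;> omega
  · have : fge P target = P.length := by omega
    simp [this]
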